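-- pv_equiv track=rewrite | github.com/WAT36/procon_work | 2025/leetcode/1403.py | minSubsequence
-- ===== SOURCE A (Python) =====
-- from typing import List
--
-- def minSubsequence(nums: List[int]) -> List[int]:
--     n=len(nums)
--     nums=sorted(nums)[::-1]
--     for i in range(len(nums)+1):
--         ansi=nums[:i]
--         notansi=nums[i:]
--         if sum(ansi) > sum(notansi):
--             return ansi
-- ===== SOURCE B (Python) =====
-- from typing import List
--
-- def minSubsequence(nums: List[int]) -> List[int]:
--     # One pass over the descending-sorted list with a running prefix sum
--     # (A recomputes both slice sums for every prefix).
--     total = sum(nums)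
--     if total < 0:
--         return []          # the empty subsequence already outweighs the rest
--     res = []
--     running = 0
--     for x in sorted(nums)[::-1]:
--         running += x
--         res.append(x)
--         if 2 * running > total:
--             return res
--     return res
-- ===== Notes on version B (the rewrite author's own statement) =====
-- stated objective: faster
-- what changed: B replaces A's quadratic scan (re-summing both slices nums[:i] and nums[i:] for every i) by one pass over the descending-sorted list maintaining a running prefix sum compared against the precomputed total.
-- outside the precondition, e.g. on minSubsequence([0]): A returns None, B returns [0]; on minSubsequence([]): A returns None, B returns []
import Mathlib
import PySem

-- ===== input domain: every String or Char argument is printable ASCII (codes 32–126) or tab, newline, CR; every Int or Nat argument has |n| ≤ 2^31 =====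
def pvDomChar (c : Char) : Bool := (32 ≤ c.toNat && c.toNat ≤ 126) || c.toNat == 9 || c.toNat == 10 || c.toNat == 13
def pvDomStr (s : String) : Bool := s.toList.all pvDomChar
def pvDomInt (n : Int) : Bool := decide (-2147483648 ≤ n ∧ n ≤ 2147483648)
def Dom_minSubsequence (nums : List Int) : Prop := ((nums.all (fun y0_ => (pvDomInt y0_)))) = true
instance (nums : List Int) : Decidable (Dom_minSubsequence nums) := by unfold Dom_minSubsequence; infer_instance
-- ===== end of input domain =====

-- B: one pass with a running prefix sum over the descending-sorted list, instead of
-- A's quadratic re-summing of both slices for every prefix length (objective: faster).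


-- ===== PORT A =====
-- for i in range(len(nums)+1): slices nums[:i]/nums[i:] with 0 ≤ i ≤ len are exactly
-- List.take i / List.drop i (PySem.List.slice_to_natCast / slice_from_natCast);
-- sorted(nums)[::-1] is (PySem.List.sorted …).reverse.  Returning none = Python's
-- fall-through None (not a list); outside Pre_ the port yields the junk value [].
def pvAGo (s : List Int) (i : Nat) : Nat → Option (List Int)
  | 0 => none
  | fuel+1 =>
      if (s.take i).sum > (s.drop i).sum then some (s.take i)
      else pvAGo s (i+1) fuel

def minSubsequence (nums : List Int) : List Int :=
  let s := (PySem.List.sorted nums (fun x => x) false).reverse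
  (pvAGo s 0 (s.length + 1)).getD []

-- ===== PORT B =====
def pvBGo (total running : Int) (res : List Int) : List Int → List Int
  | [] => res
  | x :: rest =>
      if 2 * (running + x) > total then res ++ [x]
      else pvBGo total (running + x) (res ++ [x]) rest

def minSubsequence_alt (nums : List Int) : List Int :=
  let total := nums.sum
  if total < 0 then []
  else pvBGo total 0 [] ((PySem.List.sorted nums (fun x => x) false).reverse)

-- ===== PRECONDITION & SPEC =====
-- Pre_ excludes exactly the inputs on which A falls through its loop and returns None
-- (not a list): those where no prefix of the descending sort outweighs the rest,
-- i.e. twice the sum of the positive elements does not exceed the total.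
def Pre_minSubsequence (nums : List Int) : Prop :=
  2 * ((nums.filter (fun x => 0 < x)).sum) > nums.sum
instance (nums : List Int) : Decidable (Pre_minSubsequence nums) := by
  unfold Pre_minSubsequence; infer_instance

def pvWitness_minSubsequence : List Int := [1, -2]

def Spec_minSubsequence (nums : List Int) (out : List Int) : Prop := out = minSubsequence_alt nums
instance (nums : List Int) (out : List Int) : Decidable (Spec_minSubsequence nums out) := by unfold Spec_minSubsequence; infer_instance

-- ===== CLAIM (what is proved, stated in full; the proofs are below) =====
def Claim_equal_minSubsequence : Prop := ∀ (nums : List Int), Dom_minSubsequence nums → Pre_minSubsequence nums → Spec_minSubsequence nums (minSubsequence nums)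

-- ===== LEMMAS AND PROOFS =====

-- all elements non-positive ⇒ the positive filter sums to 0
lemma pv_posSum_nil {t : List Int} (h : ∀ y ∈ t, y ≤ 0) :
    (t.filter (fun x => 0 < x)).sum = 0 := by
  have : t.filter (fun x => 0 < x) = [] := by
    rw [List.filter_eq_nil_iff]
    intro a ha
    simpa using not_lt.mpr (h a ha)
  simp [this]

-- the loop correspondence: starting past an already-failed prefix p, A's remaining
-- scan finds the same prefix that B's running-sum pass returns
lemma pv_loop (t : List Int) : ∀ (p : List Int),
    t.Pairwise (fun a b => b ≤ a) →
    ¬ (2 * p.sum > p.sum + t.sum) →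
    2 * (p.sum + (t.filter (fun x => 0 < x)).sum) > p.sum + t.sum →
    pvAGo (p ++ t) p.length (t.length + 1)
      = some (pvBGo (p.sum + t.sum) p.sum p t) := by
  induction t with
  | nil =>
      intro p _ h2 h3
      simp at h3
      exact absurd (by simpa using h3) (by simpa using h2)
  | cons x rest ih =>
      intro p hpw h2 h3
      have hx : ∀ y ∈ rest, y ≤ x := fun y hy => (List.pairwise_cons.mp hpw).1 y hy
      have hpw' : rest.Pairwise (fun a b => b ≤ a) := (List.pairwise_cons.mp hpw).2
      have hcond : ¬ ((( p ++ x :: rest).take p.length).sum > ((p ++ x :: rest).drop p.length).sum) := by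
        rw [List.take_left, List.drop_left]
        simp only [List.sum_cons] at h2 ⊢
        omega
      show pvAGo (p ++ x :: rest) p.length (rest.length + 1 + 1) = _
      rw [pvAGo, if_neg hcond]
      have hsplit : p ++ x :: rest = (p ++ [x]) ++ rest := by simp
      have hlen : p.length + 1 = (p ++ [x]).length := by simp
      by_cases hc : 2 * (p.sum + x) > p.sum + (x :: rest).sum
      · -- A succeeds at the next index; B returns res ++ [x]
        rw [hsplit, hlen, pvAGo]
        have hcond2 : (((p ++ [x]) ++ rest).take (p ++ [x]).length).sum > (((p ++ [x]) ++ rest).drop (p ++ [x]).length).sum := by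
          rw [List.take_left, List.drop_left]
          simp only [List.sum_append, List.sum_cons, List.sum_nil] at *
          omega
        rw [if_pos hcond2, List.take_left]
        have : pvBGo (p.sum + (x :: rest).sum) p.sum p (x :: rest) = p ++ [x] := by
          rw [pvBGo, if_pos hc]
        rw [this]
      · -- both loops continue
        have hx0 : 0 < x := by
          by_contra hx0
          have hz : (rest.filter (fun x => 0 < x)).sum = 0 :=
            pv_posSum_nil (fun y hy => le_trans (hx y hy) (by omega))
          have : ((x :: rest).filter (fun x => 0 < x)).sum = 0 := by
            rw [List.filter_cons, if_neg (by simpa using hx0)]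
            exact hz
          rw [this] at h3
          simp only [List.sum_cons] at h2 h3 hc
          omega
        have h3' : 2 * ((p ++ [x]).sum + (rest.filter (fun x => 0 < x)).sum)
            > (p ++ [x]).sum + rest.sum := by
          have : ((x :: rest).filter (fun x => 0 < x)).sum
              = x + (rest.filter (fun x => 0 < x)).sum := by
            rw [List.filter_cons, if_pos (by simpa using hx0)]
            simp
          simp only [List.sum_append, List.sum_cons, List.sum_nil] at *
          omega
        have h2' : ¬ (2 * (p ++ [x]).sum > (p ++ [x]).sum + rest.sum) := by
          simp only [List.sum_append, List.sum_cons, List.sum_nil] at *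
          omega
        have := ih (p ++ [x]) hpw' h2' h3'
        have e2 : (p ++ [x]).sum + rest.sum = p.sum + (x :: rest).sum := by
          simp only [List.sum_append, List.sum_cons, List.sum_nil]; ring
        have e1 : (p ++ [x]).sum = p.sum + x := by simp
        rw [e2, e1] at this
        rw [hsplit, hlen, this]
        conv_rhs => rw [pvBGo]
        rw [if_neg hc]

-- ===== VERDICT (by name: the statement is the Claim_ definition above) =====
theorem minSubsequence_spec : Claim_equal_minSubsequence := by
  intro nums _ hpre
  unfold Spec_minSubsequence minSubsequence minSubsequence_alt
  show ((pvAGo ((PySem.List.sorted nums (fun x => x) false).reverse) 0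
          (((PySem.List.sorted nums (fun x => x) false).reverse).length + 1)).getD [])
      = (if nums.sum < 0 then [] else
          pvBGo nums.sum 0 [] ((PySem.List.sorted nums (fun x => x) false).reverse))
  set s : List Int := (PySem.List.sorted nums (fun x => x) false).reverse with hs
  have hperm : s.Perm nums :=
    (List.reverse_perm _).trans (PySem.List.sorted_perm nums (fun x => x) false)
  have hsum : s.sum = nums.sum := hperm.sum_eq
  have hfil : (s.filter (fun x => 0 < x)).sum = (nums.filter (fun x => 0 < x)).sum :=
    (hperm.filter _).sum_eq
  have hpw : s.Pairwise (fun a b => b ≤ a) := by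
    rw [hs, List.pairwise_reverse]
    exact PySem.List.sorted_pairwise nums (fun x => x)
  by_cases ht : nums.sum < 0
  · -- A returns [] at i = 0; B's guard returns []
    rw [if_pos ht, pvAGo]
    have : ((s.take 0).sum > (s.drop 0).sum) := by
      simp [hsum]; omega
    rw [if_pos this]
    simp
  · rw [if_neg ht]
    have h2 : ¬ (2 * (([] : List Int).sum) > ([] : List Int).sum + s.sum) := by
      simp [hsum]; omega
    have h3 : 2 * (([] : List Int).sum + (s.filter (fun x => 0 < x)).sum)
        > ([] : List Int).sum + s.sum := by
      simp only [List.sum_nil, zero_add, hsum, hfil]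
      exact hpre
    have := pv_loop s [] hpw h2 h3
    simp only [List.nil_append, List.length_nil, List.sum_nil, zero_add] at this
    rw [this, Option.getD_some, hsum]
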